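-- pv_equiv track=rewrite | github.com/JStrazecki/MCPServer | powerbi_client.py | format_dax_expression
-- ===== SOURCE A (Python) =====
-- def format_dax_expression(expression: str) -> str:
--     """Format DAX expression for readability"""
--     if not expression:
--         return expression
--
--     # Basic formatting - add newlines after certain keywords
--     keywords = ['CALCULATE', 'RETURN', 'VAR', 'FILTER', 'ALL', 'VALUES']
--
--     formatted = expression
--     for keyword in keywords:
--         formatted = formatted.replace(f'{keyword}(', f'\n{keyword}(')
--         formatted = formatted.replace(f'{keyword} (', f'\n{keyword} (')
--
--     # Clean up extra newlines
--     formatted = '\n'.join(line.strip() for line in formatted.split('\n') if line.strip())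
--
--     return formatted
-- ===== SOURCE B (Python) =====
-- def format_dax_expression(expression: str) -> str:
--     """Format DAX expression for readability (single left-to-right scan)."""
--     if not expression:
--         return expression
--
--     keywords = ['CALCULATE', 'RETURN', 'VAR', 'FILTER', 'ALL', 'VALUES']
--     patterns = [kw + suffix for kw in keywords for suffix in ('(', ' (')]
--
--     out = []
--     i = 0
--     n = len(expression)
--     while i < n:
--         pat = next((p for p in patterns if expression.startswith(p, i)), None)
--         if pat is None:
--             out.append(expression[i])
--             i += 1
--         else:
--             out.append('\n' + pat)
--             i += len(pat)
--     formatted = ''.join(out)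
--
--     return '\n'.join(line.strip() for line in formatted.split('\n') if line.strip())
-- ===== Notes on version B (the rewrite author's own statement) =====
-- stated objective: alternative
-- what changed: Replaces A's twelve sequential full-string str.replace passes (two per keyword) with a single left-to-right scan that at each position matches one of the twelve keyword-plus-parenthesis patterns and inserts the newline on the spot; the identical strip/join cleanup is kept.
import Mathlib
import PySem

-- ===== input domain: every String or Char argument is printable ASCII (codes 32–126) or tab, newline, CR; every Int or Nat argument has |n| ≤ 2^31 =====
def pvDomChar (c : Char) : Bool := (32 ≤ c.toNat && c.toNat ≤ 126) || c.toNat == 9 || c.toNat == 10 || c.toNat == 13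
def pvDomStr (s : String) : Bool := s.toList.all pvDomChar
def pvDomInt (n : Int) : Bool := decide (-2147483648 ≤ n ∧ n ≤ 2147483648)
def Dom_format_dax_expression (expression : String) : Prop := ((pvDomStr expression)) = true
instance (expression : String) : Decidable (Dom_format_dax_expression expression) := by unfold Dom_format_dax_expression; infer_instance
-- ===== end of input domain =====

-- B replaces A's twelve sequential full-string replace passes by one left-to-right scan; same return value (objective: alternative, not faster).

-- ===== PORT A =====
-- Literal port of A: for each keyword, replace 'KW(' then 'KW (' over the whole string, then strip/join the lines.
def format_dax_expression (expression : String) : String :=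
  if expression = "" then expression
  else
    let keywords : List (List Char) :=
      ["CALCULATE".toList, "RETURN".toList, "VAR".toList, "FILTER".toList, "ALL".toList, "VALUES".toList]
    let formatted : List Char := keywords.foldl (fun f kw =>
      PySem.Chars.replace
        (PySem.Chars.replace f (kw ++ ['(']) ('\n' :: (kw ++ ['('])))
        (kw ++ [' ', '(']) ('\n' :: (kw ++ [' ', '(']))) expression.toList
    String.ofList (PySem.Chars.join ['\n']
      (((PySem.Chars.splitOn formatted ['\n']).map PySem.Chars.strip).filter (fun l => !l.isEmpty)))

-- ===== PORT B =====
-- B's patterns list: [kw + suffix for kw in keywords for suffix in ('(', ' (')]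
def pvBPatterns : List (List Char) :=
  (["CALCULATE".toList, "RETURN".toList, "VAR".toList, "FILTER".toList, "ALL".toList, "VALUES".toList]).flatMap
    (fun kw => [kw ++ ['('], kw ++ [' ', '(']])

-- B's while-loop: one scan; at each position emit '\n' + the matched pattern (advancing past it) or the single char.
-- fuel = number of remaining loop iterations allowed (the loop runs at most len(expression) times).
def pvBScan : Nat → List Char → List Char
  | _, [] => []
  | 0, _ :: _ => []
  | fuel+1, c :: t =>
    match pvBPatterns.find? (fun p => p.isPrefixOf (c :: t)) with
    | some p => ('\n' :: p) ++ pvBScan fuel ((c :: t).drop p.length)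
    | none => c :: pvBScan fuel t

def format_dax_expression_alt (expression : String) : String :=
  if expression = "" then expression
  else
    let formatted : List Char := pvBScan expression.toList.length expression.toList
    String.ofList (PySem.Chars.join ['\n']
      (((PySem.Chars.splitOn formatted ['\n']).map PySem.Chars.strip).filter (fun l => !l.isEmpty)))

-- ===== PRECONDITION & SPEC =====
def Spec_format_dax_expression (expression : String) (out : String) : Prop := out = format_dax_expression_alt expression
instance (expression : String) (out : String) : Decidable (Spec_format_dax_expression expression out) := by unfold Spec_format_dax_expression; infer_instance

-- ===== CLAIM (what is proved, stated in full; the proofs are below) =====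
def Claim_equal_format_dax_expression : Prop := ∀ (expression : String), Dom_format_dax_expression expression → Spec_format_dax_expression expression (format_dax_expression expression)

-- ===== LEMMAS AND PROOFS =====

-- A clean recursion computing PySem.Chars.replace (characterisation proved in pvReplace_eq_R).
def pvRepl (old new : List Char) : Nat → List Char → List Char
  | 0, l => l
  | _+1, [] => []
  | fuel+1, c :: t =>
    if old.isPrefixOf (c :: t) then new ++ pvRepl old new fuel ((c :: t).drop old.length)
    else c :: pvRepl old new fuel t

theorem pvGo_eq (old new : List Char) : ∀ (fuel : Nat) (l acc : List Char),
    PySem.Chars.replace.go old new fuel l acc = acc.reverse ++ pvRepl old new fuel l := by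
  intro fuel
  induction fuel with
  | zero => intro l acc; cases l <;> simp [PySem.Chars.replace.go, pvRepl]
  | succ n ih =>
    intro l acc
    cases l with
    | nil => simp [PySem.Chars.replace.go, pvRepl]
    | cons c t =>
      simp only [PySem.Chars.replace.go, pvRepl]
      split <;> simp [ih]

theorem pvMono (old new : List Char) (ho : old ≠ []) : ∀ (fuel : Nat) (fuel' : Nat) (l : List Char),
    l.length ≤ fuel → l.length ≤ fuel' → pvRepl old new fuel l = pvRepl old new fuel' l := by
  intro fuel
  induction fuel with
  | zero =>
    intro fuel' l h _
    have : l = [] := List.eq_nil_of_length_eq_zero (Nat.le_zero.mp h)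
    subst this; cases fuel' <;> simp [pvRepl]
  | succ n ih =>
    intro fuel' l h h'
    cases l with
    | nil => cases fuel' <;> simp [pvRepl]
    | cons c t =>
      cases fuel' with
      | zero => simp at h'
      | succ m =>
        simp only [pvRepl]
        split
        · rename_i hpre
          have hlen : ((c :: t).drop old.length).length ≤ n := by
            have : 1 ≤ old.length := by
              cases old with | nil => exact absurd rfl ho | cons _ _ => simp
            simp only [List.length_drop, List.length_cons]
            simp only [List.length_cons] at h
            omega
          have hlen' : ((c :: t).drop old.length).length ≤ m := by
            have : 1 ≤ old.length := by
              cases old with | nil => exact absurd rfl ho | cons _ _ => simp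
            simp only [List.length_drop, List.length_cons]
            simp only [List.length_cons] at h'
            omega
          rw [ih _ _ hlen hlen']
        · have ht : t.length ≤ n := by simp only [List.length_cons] at h; omega
          have ht' : t.length ≤ m := by simp only [List.length_cons] at h'; omega
          rw [ih _ _ ht ht']

-- canonical-fuel form
def pvR (old new l : List Char) : List Char := pvRepl old new l.length l

theorem pvRepl_eq_R (old new : List Char) (ho : old ≠ []) {fuel : Nat} {l : List Char}
    (h : l.length ≤ fuel) : pvRepl old new fuel l = pvR old new l :=
  pvMono old new ho fuel l.length l h (Nat.le_refl _)

theorem pvReplace_eq_R (old new l : List Char) (ho : old ≠ []) :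
    PySem.Chars.replace l old new = pvR old new l := by
  have hne : old.isEmpty = false := by cases old with | nil => exact absurd rfl ho | cons _ _ => rfl
  simp [PySem.Chars.replace, hne, pvGo_eq, pvR]

theorem pvR_nil (old new : List Char) : pvR old new [] = [] := rfl

theorem pvR_cons (old new : List Char) {c : Char} {t : List Char} (h : ¬ old <+: (c :: t)) :
    pvR old new (c :: t) = c :: pvR old new t := by
  have : old.isPrefixOf (c :: t) = false := by
    by_contra hb
    exact h (List.isPrefixOf_iff_prefix.mp (by revert hb; cases old.isPrefixOf (c :: t) <;> simp))
  simp [pvR, pvRepl, this]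

theorem pvR_match (old new rest : List Char) (ho : old ≠ []) :
    pvR old new (old ++ rest) = new ++ pvR old new rest := by
  cases old with
  | nil => exact absurd rfl ho
  | cons o os =>
    have hpre : (o :: os).isPrefixOf (o :: (os ++ rest)) = true :=
      List.isPrefixOf_iff_prefix.mpr (by rw [show o :: (os ++ rest) = (o :: os) ++ rest from rfl]; exact List.prefix_append _ _)
    have hdrop : (o :: (os ++ rest)).drop (o :: os).length = rest := by
      rw [show o :: (os ++ rest) = (o :: os) ++ rest from rfl]; exact List.drop_left
    show pvRepl (o :: os) new ((o :: os) ++ rest).length ((o :: os) ++ rest) = _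
    rw [show ((o :: os) ++ rest).length = (os ++ rest).length + 1 by simp,
        show (o :: os) ++ rest = o :: (os ++ rest) from rfl]
    simp only [pvRepl, hpre, if_true, hdrop]
    rw [pvRepl_eq_R _ _ (by simp) (by simp)]

theorem pvR_pass (old new : List Char) :
    ∀ (x rest : List Char), (∀ k, k < x.length → ¬ old <+: (x.drop k ++ rest)) →
    pvR old new (x ++ rest) = x ++ pvR old new rest := by
  intro x
  induction x with
  | nil => intro rest _; simp
  | cons c x' ih =>
    intro rest H
    have h0 : ¬ old <+: (c :: (x' ++ rest)) := by
      have := H 0 (by simp)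
      simpa using this
    rw [List.cons_append, pvR_cons old new h0, ih rest (fun k hk => by
      have := H (k+1) (by simp; omega)
      simpa using this)]
    rfl

-- a '\n'-free prefix of a replace result (with replacement starting '\n') is a prefix of the input
theorem pvNF (old w : List Char) : ∀ (fuel : Nat) (l q : List Char), '\n' ∉ q →
    q <+: pvRepl old ('\n' :: w) fuel l → q <+: l := by
  intro fuel
  induction fuel with
  | zero => intro l q _ h; simpa [pvRepl] using h
  | succ n ih =>
    intro l q hq h
    cases l with
    | nil => simpa [pvRepl] using h
    | cons c t =>
      simp only [pvRepl] at h
      split at h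
      · cases q with
        | nil => exact List.nil_prefix
        | cons a q' =>
          rw [List.cons_append] at h
          have := List.cons_prefix_cons.mp h
          exact absurd this.1 (by intro he; exact hq (by simp [he]))
      · cases q with
        | nil => exact List.nil_prefix
        | cons a q' =>
          have := List.cons_prefix_cons.mp h
          obtain ⟨rfl, h2⟩ := this
          have hq' : '\n' ∉ q' := fun hm => hq (by simp [hm])
          exact List.cons_prefix_cons.mpr ⟨rfl, ih t q' hq' h2⟩

theorem pvNF_R (old w l q : List Char) (hq : '\n' ∉ q) (h : q <+: pvR old ('\n' :: w) l) :
    q <+: l := pvNF old w l.length l q hq h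

-- concrete pattern facts
theorem pvFactNonempty : ∀ p ∈ pvBPatterns, p ≠ [] := by decide
theorem pvFactNoNl : ∀ p ∈ pvBPatterns, '\n' ∉ p := by decide
theorem pvFactNoPrefix : ∀ p ∈ pvBPatterns, ∀ q ∈ pvBPatterns, p ≠ q → (p.isPrefixOf q) = false := by decide
theorem pvFactInner : ∀ p ∈ pvBPatterns, ∀ q ∈ pvBPatterns, ∀ k, k < p.length → 0 < k →
    (q.isPrefixOf (p.drop k)) = false ∧ ((p.drop k).isPrefixOf q) = false := by decide

theorem pvNotPrefix_of_isPrefixOf_false {p q : List Char} (h : p.isPrefixOf q = false) : ¬ p <+: q := by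
  intro hp
  rw [List.isPrefixOf_iff_prefix.mpr hp] at h
  simp at h
theorem pvFactNodup : pvBPatterns.Nodup := by decide

theorem pvPrefix_split {q a rest : List Char} (h : q <+: a ++ rest) : q <+: a ∨ a <+: q :=
  (List.prefix_or_prefix_of_prefix h (List.prefix_append a rest))

theorem pvNoMatchIn {p q : List Char} (hp : p ∈ pvBPatterns) (hq : q ∈ pvBPatterns) (hne : q ≠ p) :
    ∀ (rest : List Char) (k : Nat), k < p.length → ¬ q <+: (p.drop k ++ rest) := by
  intro rest k hk h
  rcases pvPrefix_split h with h1 | h1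
  · rcases Nat.eq_zero_or_pos k with rfl | hkpos
    · simp at h1
      exact pvNotPrefix_of_isPrefixOf_false (pvFactNoPrefix q hq p hp hne) h1
    · exact pvNotPrefix_of_isPrefixOf_false (pvFactInner p hp q hq k hk hkpos).1 h1
  · rcases Nat.eq_zero_or_pos k with rfl | hkpos
    · simp at h1
      exact pvNotPrefix_of_isPrefixOf_false (pvFactNoPrefix p hp q hq (fun he => hne he.symm)) h1
    · exact pvNotPrefix_of_isPrefixOf_false (pvFactInner p hp q hq k hk hkpos).2 h1

theorem pvNoMatchInNl {p q : List Char} (hp : p ∈ pvBPatterns) (hq : q ∈ pvBPatterns) (hne : q ≠ p) :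
    ∀ (rest : List Char) (k : Nat), k < ('\n' :: p).length → ¬ q <+: (('\n' :: p).drop k ++ rest) := by
  intro rest k hk h
  cases k with
  | zero =>
    simp only [List.drop_zero, List.cons_append] at h
    cases q with
    | nil => exact pvFactNonempty [] hq rfl
    | cons a q' =>
      have := (List.cons_prefix_cons.mp h).1
      exact pvFactNoNl _ hq (by simp [this])
  | succ k' =>
    simp only [List.drop_succ_cons] at h
    exact pvNoMatchIn hp hq hne rest k' (by simpa using hk) h

-- the A-side chain as a fold over the twelve patterns
def pvF (ps : List (List Char)) (s : List Char) : List Char :=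
  ps.foldl (fun acc p => PySem.Chars.replace acc p ('\n' :: p)) s

theorem pvF_nil (ps : List (List Char)) (hsub : ∀ p ∈ ps, p ∈ pvBPatterns) : pvF ps [] = [] := by
  induction ps with
  | nil => rfl
  | cons p ps ih =>
    have ho : p ≠ [] := pvFactNonempty p (hsub p (by simp))
    show pvF ps (PySem.Chars.replace [] p ('\n' :: p)) = []
    rw [pvReplace_eq_R _ _ _ ho, pvR_nil]
    exact ih (fun q hqm => hsub q (by simp [hqm]))

theorem pvF_pass (ps : List (List Char)) (hsub : ∀ p ∈ ps, p ∈ pvBPatterns)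
    (x : List Char) (hx : ∀ q ∈ ps, ∀ (rest : List Char) (k : Nat), k < x.length → ¬ q <+: (x.drop k ++ rest)) :
    ∀ (rest : List Char), pvF ps (x ++ rest) = x ++ pvF ps rest := by
  induction ps with
  | nil => intro rest; rfl
  | cons p ps ih =>
    intro rest
    have ho : p ≠ [] := pvFactNonempty p (hsub p (by simp))
    show pvF ps (PySem.Chars.replace (x ++ rest) p ('\n' :: p)) = x ++ pvF ps (PySem.Chars.replace rest p ('\n' :: p))
    rw [pvReplace_eq_R _ _ _ ho, pvReplace_eq_R _ _ _ ho,
        pvR_pass p ('\n' :: p) x rest (fun k hk => hx p (by simp) rest k hk)]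
    exact ih (fun q hqm => hsub q (by simp [hqm])) (fun q hqm => hx q (by simp [hqm])) _

theorem pvF_cons_nomatch (ps : List (List Char)) (hsub : ∀ p ∈ ps, p ∈ pvBPatterns) :
    ∀ (c : Char) (t : List Char), (∀ p ∈ pvBPatterns, ¬ p <+: (c :: t)) →
    pvF ps (c :: t) = c :: pvF ps t := by
  induction ps with
  | nil => intro c t _; rfl
  | cons p ps ih =>
    intro c t H
    have hp : p ∈ pvBPatterns := hsub p (by simp)
    have ho : p ≠ [] := pvFactNonempty p hp
    show pvF ps (PySem.Chars.replace (c :: t) p ('\n' :: p)) = c :: pvF ps (PySem.Chars.replace t p ('\n' :: p))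
    rw [pvReplace_eq_R _ _ _ ho, pvReplace_eq_R _ _ _ ho, pvR_cons p ('\n' :: p) (H p hp)]
    refine ih (fun q hqm => hsub q (by simp [hqm])) c (pvR p ('\n' :: p) t) ?_
    intro q hq hpre
    cases q with
    | nil => exact pvFactNonempty [] hq rfl
    | cons a q' =>
      obtain ⟨rfl, h2⟩ := List.cons_prefix_cons.mp hpre
      have hq' : '\n' ∉ q' := fun hm => pvFactNoNl _ hq (by simp [hm])
      exact H _ hq (List.cons_prefix_cons.mpr ⟨rfl, pvNF_R p p t q' hq' h2⟩)

theorem pvMain : ∀ (fuel : Nat) (s : List Char), s.length ≤ fuel →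
    pvF pvBPatterns s = pvBScan fuel s := by
  intro fuel
  induction fuel with
  | zero =>
    intro s h
    have : s = [] := List.eq_nil_of_length_eq_zero (Nat.le_zero.mp h)
    subst this
    rw [pvF_nil _ (fun _ h => h)]; rfl
  | succ n ih =>
    intro s h
    cases s with
    | nil => rw [pvF_nil _ (fun _ h => h)]; rfl
    | cons c t =>
      cases hfind : pvBPatterns.find? (fun p => p.isPrefixOf (c :: t)) with
      | none =>
        have hno : ∀ p ∈ pvBPatterns, ¬ p <+: (c :: t) := by
          intro p hp hpre
          have h2 : ¬ p.isPrefixOf (c :: t) = true := by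
            simpa using List.find?_eq_none.mp hfind p hp
          exact h2 (List.isPrefixOf_iff_prefix.mpr hpre)
        rw [pvF_cons_nomatch _ (fun _ h => h) c t hno]
        rw [ih t (by simpa using Nat.le_of_succ_le_succ h)]
        simp [pvBScan, hfind]
      | some p =>
        have hp : p ∈ pvBPatterns := List.mem_of_find?_eq_some hfind
        have hpre : p <+: (c :: t) :=
          List.isPrefixOf_iff_prefix.mp (by simpa using List.find?_some hfind)
        obtain ⟨rest, hrest⟩ := hpre
        obtain ⟨l₁, l₂, hsplit⟩ := List.append_of_mem hp
        have hnodup := pvFactNodup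
        rw [hsplit] at hnodup
        have hmid : p ∉ l₁ ++ l₂ := (List.nodup_cons.mp (List.nodup_middle.mp hnodup)).1
        have hpl1 : p ∉ l₁ := fun hm => hmid (List.mem_append.mpr (Or.inl hm))
        have hpl2 : p ∉ l₂ := fun hm => hmid (List.mem_append.mpr (Or.inr hm))
        have ho : p ≠ [] := pvFactNonempty p hp
        have hplen : 1 ≤ p.length := by
          cases p with | nil => exact absurd rfl ho | cons _ _ => simp
        -- decompose the fold
        have hF : pvF pvBPatterns (c :: t) =
            pvF l₂ (PySem.Chars.replace (pvF l₁ (c :: t)) p ('\n' :: p)) := by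
          rw [hsplit]; simp [pvF, List.foldl_append]
        have hsub1 : ∀ q ∈ l₁, q ∈ pvBPatterns := fun q hq => by rw [hsplit]; simp [hq]
        have hsub2 : ∀ q ∈ l₂, q ∈ pvBPatterns := fun q hq => by rw [hsplit]; simp [hq]
        have hne1 : ∀ q ∈ l₁, q ≠ p := fun q hq he => hpl1 (he ▸ hq)
        have hne2 : ∀ q ∈ l₂, q ≠ p := fun q hq he => hpl2 (he ▸ hq)
        have h1 : pvF l₁ (c :: t) = p ++ pvF l₁ rest := by
          rw [← hrest]
          exact pvF_pass l₁ hsub1 p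
            (fun q hq rest' k hk => pvNoMatchIn hp (hsub1 q hq) (hne1 q hq) rest' k hk) rest
        have h2 : PySem.Chars.replace (p ++ pvF l₁ rest) p ('\n' :: p) =
            ('\n' :: p) ++ PySem.Chars.replace (pvF l₁ rest) p ('\n' :: p) := by
          rw [pvReplace_eq_R _ _ _ ho, pvReplace_eq_R _ _ _ ho, pvR_match _ _ _ ho]
        have h3 : pvF l₂ (('\n' :: p) ++ PySem.Chars.replace (pvF l₁ rest) p ('\n' :: p)) =
            ('\n' :: p) ++ pvF l₂ (PySem.Chars.replace (pvF l₁ rest) p ('\n' :: p)) :=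
          pvF_pass l₂ hsub2 ('\n' :: p)
            (fun q hq rest' k hk => pvNoMatchInNl hp (hsub2 q hq) (hne2 q hq) rest' k hk) _
        have hFrest : pvF pvBPatterns rest =
            pvF l₂ (PySem.Chars.replace (pvF l₁ rest) p ('\n' :: p)) := by
          rw [hsplit]; simp [pvF, List.foldl_append]
        have hrestlen : rest.length ≤ n := by
          have : (c :: t).length = p.length + rest.length := by rw [← hrest]; simp
          simp only [List.length_cons] at h this
          omega
        have hdrop : (c :: t).drop p.length = rest := by rw [← hrest]; exact List.drop_left
        rw [hF, h1, h2, h3, ← hFrest, ih rest hrestlen]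
        simp [pvBScan, hfind, hdrop]

theorem pvChain_eq (s : List Char) :
    (["CALCULATE".toList, "RETURN".toList, "VAR".toList, "FILTER".toList, "ALL".toList,
      "VALUES".toList] : List (List Char)).foldl (fun f kw =>
      PySem.Chars.replace
        (PySem.Chars.replace f (kw ++ ['(']) ('\n' :: (kw ++ ['('])))
        (kw ++ [' ', '(']) ('\n' :: (kw ++ [' ', '(']))) s = pvF pvBPatterns s := by
  simp only [pvF, pvBPatterns, List.flatMap_cons, List.flatMap_nil, List.append_nil,
    List.cons_append, List.nil_append, List.foldl_cons, List.foldl_nil]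

-- ===== VERDICT (by name: the statement is the Claim_ definition above) =====
theorem format_dax_expression_spec : Claim_equal_format_dax_expression := by
  intro expression _
  unfold Spec_format_dax_expression format_dax_expression format_dax_expression_alt
  by_cases he : expression = ""
  · simp [he]
  · rw [if_neg he, if_neg he]
    simp only [pvChain_eq, pvMain expression.toList.length expression.toList (Nat.le_refl _)]
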